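-- pv_equiv track=rewrite | github.com/cbdq-io/datasets | uk/gov/metoffice/historic_station_data/scripts/etl.py | clean_sun_data
-- ===== SOURCE A (Python) =====
-- import itertools
-- import string
--
-- def clean_sun_data(token: str) -> str:
--     """
--     Clean up the sun token.
--
--     The sun token is the last on the line.  This token seems to be the
--     most prone to getting dirty data.  Examples are:
--
--       - lowestoft 2007-09
--       - whitby 1976-01 - 2000-01
--
--     Therefore, we strip all non-valid characters from the token.
--
--     Parameters
--     ----------
--     token : str
--         The token to be cleaned.
--
--     Returns
--     -------
--     str
--         The cleaned token.
--     """
--     disallowed_characters = string.printable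
--     allowed_characters = ['.', '*', '#', '-', string.digits]
--     allowed_characters = list(itertools.chain.from_iterable(allowed_characters))
--
--     for character in allowed_characters:
--         disallowed_characters = disallowed_characters.replace(character, '')
--
--     for character in disallowed_characters:
--         token = token.replace(character, '')
--
--     return token
-- ===== SOURCE B (Python) =====
-- import string
--
--
-- def clean_sun_data(token: str) -> str:
--     """Strip every disallowed character from token in one pass.
--
--     Disallowed = string.printable minus '.', '*', '#', '-' and the digits;
--     characters outside string.printable are kept, as in the original.
--     """
--     allowed = '.*#-' + string.digits
--     disallowed = {c for c in string.printable if c not in allowed}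
--     return ''.join(c for c in token if c not in disallowed)
-- ===== Notes on version B (the rewrite author's own statement) =====
-- stated objective: idiomatic
-- what changed: Replaces A's two replace-loops (build the disallowed string by repeated str.replace, then one full token.replace scan per disallowed character) with a set comprehension for the disallowed characters and a single filtering pass over the token.
import Mathlib
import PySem

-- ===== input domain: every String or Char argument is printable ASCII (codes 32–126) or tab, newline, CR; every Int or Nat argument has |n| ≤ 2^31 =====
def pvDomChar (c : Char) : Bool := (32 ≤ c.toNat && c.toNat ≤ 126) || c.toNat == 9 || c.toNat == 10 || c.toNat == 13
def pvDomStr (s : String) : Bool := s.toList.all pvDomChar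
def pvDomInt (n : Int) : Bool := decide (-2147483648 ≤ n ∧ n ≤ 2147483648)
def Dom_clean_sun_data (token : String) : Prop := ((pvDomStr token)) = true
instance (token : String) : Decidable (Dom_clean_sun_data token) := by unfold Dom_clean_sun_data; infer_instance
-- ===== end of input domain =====

-- B keeps disallowed characters in a set and filters the token in one pass,
-- instead of A's one token.replace scan per disallowed character (objective: idiomatic).

-- string.printable (shared library constant)
def pvPrintable : String := "0123456789abcdefghijklmnopqrstuvwxyzABCDEFGHIJKLMNOPQRSTUVWXYZ!\"#$%&'()*+,-./:;<=>?@[\\]^_`{|}~ \t\n\r\x0B\x0C"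

-- ===== PORT A =====
def clean_sun_data (token : String) : String :=
  -- allowed_characters = list(chain.from_iterable(['.', '*', '#', '-', string.digits]))
  let allowed : List Char := ['.', '*', '#', '-'] ++ "0123456789".toList
  -- for character in allowed_characters: disallowed = disallowed.replace(character, '')
  let disallowed : String :=
    allowed.foldl (fun d ch => PySem.Str.replace d (String.ofList [ch]) "") pvPrintable
  -- for character in disallowed_characters: token = token.replace(character, '')
  disallowed.toList.foldl (fun t ch => PySem.Str.replace t (String.ofList [ch]) "") token

-- ===== PORT B =====
def clean_sun_data_alt (token : String) : String :=
  let allowed : List Char := (".*#-" ++ "0123456789").toList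
  -- disallowed = {c for c in string.printable if c not in allowed}
  let disallowed : PySem.Set Char :=
    PySem.Set.ofList (pvPrintable.toList.filter (fun c => !(allowed.contains c)))
  -- ''.join(c for c in token if c not in disallowed)
  String.ofList (token.toList.filter (fun c => !(PySem.Set.contains disallowed c)))

-- ===== PRECONDITION & SPEC =====
def Spec_clean_sun_data (token : String) (out : String) : Prop := out = clean_sun_data_alt token
instance (token : String) (out : String) : Decidable (Spec_clean_sun_data token out) := by unfold Spec_clean_sun_data; infer_instance

-- ===== CLAIM (what is proved, stated in full; the proofs are below) =====
def Claim_equal_clean_sun_data : Prop := ∀ (token : String), Dom_clean_sun_data token → Spec_clean_sun_data token (clean_sun_data token)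

-- ===== LEMMAS AND PROOFS =====

-- replace.go with a single-character needle and empty replacement is a filter
theorem go_single (c : Char) (l : List Char) : ∀ (fuel : Nat) (acc : List Char),
    l.length ≤ fuel →
    PySem.Chars.replace.go [c] [] fuel l acc = acc.reverse ++ l.filter (fun x => !(x == c)) := by
  induction l with
  | nil =>
    intro fuel acc _
    cases fuel <;> simp [PySem.Chars.replace.go]
  | cons c' t ih =>
    intro fuel acc hf
    cases fuel with
    | zero => simp at hf
    | succ f =>
      have ht : t.length ≤ f := by simpa using hf
      by_cases h : c = c'
      · subst h
        simp [PySem.Chars.replace.go, List.isPrefixOf, ih f acc ht]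
      · have hb : (c == c') = false := by simp [h]
        have hb' : (c' == c) = false := by simp [Ne.symm h]
        simp [PySem.Chars.replace.go, List.isPrefixOf, hb, hb', ih f (c' :: acc) ht]

theorem replace_single (cs : List Char) (c : Char) :
    PySem.Chars.replace cs [c] [] = cs.filter (fun x => !(x == c)) := by
  simp [PySem.Chars.replace, go_single c cs cs.length [] le_rfl]

-- the whole replace-loop is a filter against the character list
theorem fold_replace (ds : List Char) : ∀ (t : String),
    ds.foldl (fun s ch => PySem.Str.replace s (String.ofList [ch]) "") t
      = String.ofList (t.toList.filter (fun x => !(ds.contains x))) := by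
  induction ds with
  | nil =>
    intro t
    simp
  | cons d ds ih =>
    intro t
    have h1 : (PySem.Str.replace t (String.ofList [d]) "").toList
        = t.toList.filter (fun x => !(x == d)) := by
      simp [PySem.Str.toList_replace, replace_single]
    simp only [List.foldl_cons, ih, h1, List.filter_filter]
    congr 1
    apply List.filter_congr
    intro x _
    rw [List.contains_cons, Bool.not_or, Bool.and_comm]

-- ===== VERDICT (by name: the statement is the Claim_ definition above) =====
set_option maxRecDepth 8192 in
theorem clean_sun_data_spec : Claim_equal_clean_sun_data := by
  intro token _
  unfold Spec_clean_sun_data clean_sun_data clean_sun_data_alt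
  simp only [fold_replace, String.toList_ofList]
  have hA : (['.', '*', '#', '-'] ++ "0123456789".toList) = (".*#-" ++ "0123456789").toList := by
    decide
  rw [hA]
  have hset : PySem.Set.ofList
        (pvPrintable.toList.filter (fun c => !((".*#-" ++ "0123456789").toList.contains c)))
      = pvPrintable.toList.filter (fun c => !((".*#-" ++ "0123456789").toList.contains c)) := by
    decide
  rw [hset]
  simp [PySem.Set.contains_eq_listContains]
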